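/- GENERATED by tools/from_farm_form.py from farm/worked/_start/Proof.lean (a worked proof of the farm's unit `_start`,
   accepted by the verdict) — do not edit. -/
import Toy.Spec.Units.start

/-!
  The stub `_start` of the base image (0x100000, 13 instructions; c/base/start.S) reaches `prog_exit` (0x100056) from a start
  state `Top.StartOK Toy.Spec.rt … len u`:

      0x100000            `call run_ctors`  (contract `runCtorsSpec rt`: `.init_array` and the descriptor table are read in a
                          memory that differs from the start memory by the pushed return address only)
      0x100005 (ret1)     run_ctors has returned: the image's data and the parameter block are off its footprint (its stack and
                          shadow bytes), so the six loads read the start state's parameter words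
      0x100035            `call prog_main`: its precondition from `StartOK.registered` (the shadow layer after run_ctors), the six
                          values, `IN` and `OUT` live and off the stack, `weights` registered
      0x10003a (ret2)     prog_main has returned: three unchecked stores at literal addresses of the parameter block, RIP = `L.exit`
-/

open X86 X86.User Asan ProgX.Base Toy.Spec

set_option maxRecDepth 4000
set_option maxHeartbeats 4000000

namespace Toy.Spec.Proved.start
open Toy.Spec.start (Statement)

/-- Every window `__asan_register_globals` may write lies in the shadow region `[C00000H, E00000H)`: the slot of a sane
descriptor lies in the image, below 200000H. -/
theorem st_registerWrites_shadow_w (descs : List GlobalDesc) (hok : ∀ d, d ∈ descs → d.OK) :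
    ∀ w, w ∈ registerWrites descs → 0xC00000 ≤ w.lo ∧ w.hi ≤ 0xE00000 := by
  intro w hw
  unfold registerWrites at hw
  obtain ⟨d, hd, rfl⟩ := List.mem_map.mp hw
  obtain ⟨d1, d2, d3, d4, d5⟩ := hok d hd
  unfold shadowSpan
  simp only
  omega

/-- `.init_array` is still in a memory that agrees with the start memory on the image's data (the slot 141000H is read). -/
theorem st_ctorIn_eqOn_w {mem mem' : Mem} (h : CtorIn mem rt.sym) (he : Mem.EqOn 0x100000 0x700000 mem mem') :
    CtorIn mem' rt.sym := by
  obtain ⟨h1, h2⟩ := h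
  refine ⟨h1, ?_⟩
  have e0 : rt.sym.initArrayStart = 0x141000 := by decide
  rw [e0] at h2 ⊢
  rw [he.readLE _ 8 (by decide) (by decide) (by decide)]
  exact h2

/-- The descriptor table is still in a memory that agrees with the start memory on the image's data. -/
theorem st_descsIn_eqOn_w {mem mem' : Mem} (h : DescsIn mem rt.table rt.descs) (he : Mem.EqOn 0x100000 0x700000 mem mem') :
    DescsIn mem' rt.table rt.descs := by
  intro i hi
  have hlen : rt.descs.length = 3 := by decide
  have htab : rt.table = 0x141900 := by decide
  have hi3 : i < 3 := by omega
  obtain ⟨h1, h2, h3⟩ := h i hi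
  have k1 : (UInt64.ofNat (rt.table + 64 * i)).toNat = rt.table + 64 * i := by
    rw [UInt64.toNat_ofNat']
    omega
  have k2 : (UInt64.ofNat (rt.table + 64 * i + 8)).toNat = rt.table + 64 * i + 8 := by
    rw [UInt64.toNat_ofNat']
    omega
  have k3 : (UInt64.ofNat (rt.table + 64 * i + 16)).toNat = rt.table + 64 * i + 16 := by
    rw [UInt64.toNat_ofNat']
    omega
  refine ⟨?_, ?_, ?_⟩
  · rw [he.readLE _ 8 (by omega) (by omega) (by omega)]
    exact h1
  · rw [he.readLE _ 8 (by omega) (by omega) (by omega)]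
    exact h2
  · rw [he.readLE _ 8 (by omega) (by omega) (by omega)]
    exact h3

/-- **No live object of the start of `prog_main` lies in the text window**: the three registered globals (`.rodata`, `.data`,
`.bss`: at or above 141200H), IN (200000H) and OUT (400000H). By evaluation. -/
theorem st_offText_w (len : Nat) : ∀ o, o ∈ Toy.Globals.objs ++ initialObjs len → ProgX.Base.T.hi ≤ o.base := by
  intro o ho
  rcases List.mem_append.mp ho with hg | hi
  · have hglobals : ∀ g, g ∈ Toy.Globals.objs → ProgX.Base.T.hi ≤ g.base := by decide
    exact hglobals o hg
  · unfold initialObjs at hi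
    simp only [List.mem_cons, List.not_mem_nil, or_false] at hi
    rcases hi with rfl | rfl
    · show ProgX.Base.T.hi ≤ 0x200000
      decide
    · show ProgX.Base.T.hi ≤ 0x400000
      decide

/-- The input `IN` (200000H, `len` bytes) is a live object at the start of `prog_main`. -/
theorem st_live_in_w (len : Nat) : ProgX.Base.LiveIn (Toy.Globals.objs ++ initialObjs len) [] 0x200000 len := by
  refine ⟨objIN len, ?_, Nat.le_refl _, Nat.le_refl _⟩
  apply List.mem_append_right
  apply List.mem_append_right
  unfold initialObjs
  exact List.mem_cons_self

/-- The first 8 bytes of the output `OUT` (400000H, 300000H bytes) lie inside a live object at the start of `prog_main`. -/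
theorem st_live_out_w (len : Nat) : ProgX.Base.LiveIn (Toy.Globals.objs ++ initialObjs len) [] 0x400000 8 := by
  refine ⟨objOUT, ?_, by decide, by decide⟩
  apply List.mem_append_right
  apply List.mem_append_right
  unfold initialObjs
  exact List.mem_cons_of_mem _ List.mem_cons_self

/-- A parameter word at most 1FF000H, loaded into a register, is that number. -/
theorem st_toNat_ofNat_w (n : Nat) (h : n ≤ 0x1FF000) : (UInt64.ofNat n).toNat = n := by
  rw [UInt64.toNat_ofNat']
  omega

end Toy.Spec.Proved.start

/-- The stub `_start` reaches `prog_exit`: `call run_ctors`, the six parameter loads, `call prog_main` (its precondition from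
`Top.StartOK.registered`), three unchecked stores of the result, RIP = `ProgX.Base.L.exit`. -/
theorem Toy.Spec.Proved.start_ok : Toy.Spec.start.Statement := by
  intro Lay hLay μ hμ u₀ hcode h_rc h_pm len u hst hco
  -- the start state's facts under the names the walker reads (there is no `AtEntry`: nothing called the stub)
  have w_rip : u.rip = ProgX.Base.L._start.entry := hst.rip
  have c_rsp : u.reg .rsp = 0x800000 := hst.rsp
  have w_eq : Mem.EqOn ProgX.Base.L.textLo ProgX.Base.L.textHi u₀.mem u.mem := hco
  have hdf : u.flags .df = false := (show abiInv _ from hst.inv).1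
  have hmx : u.mxcsr &&& 0x1F80 = 0x1F80 := (show abiInv _ from hst.inv).2
  have hsse := ProgX.Base.sseOK_of_abiInv hst.inv
  have w_kept : RegsKept [.rsp] u u := RegsKept.refl _ _
  have hpm := h_pm (Toy.Globals.objs ++ initialObjs len) []
  -- 0x100000: call run_ctors
  u_walk hcode [hμ.vendor] span [ProgX.Base.L.textLo, ProgX.Base.L.textHi] side (v_side)
  case call_inv =>
    v_inv
  case pre_100000 =>
    -- run_ctors reads `.init_array` and the descriptor table in the memory after the push of its return address
    have hdata : Mem.EqOn 0x100000 0x700000 u.mem s_100000.mem := by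
      rw [w_mem]
      exact Mem.EqOn.writeLE _ _ _ _ _ _ (by decide) (by decide)
    exact ⟨Toy.Spec.Proved.start.st_ctorIn_eqOn_w hst.ctor hdata, Toy.Spec.Proved.start.st_descsIn_eqOn_w hst.descs hdata, hst.descs_ok⟩
  -- 0x100005 (ret1): the state run_ctors returned
  v_after_call w_rsp_100000 w_mem_100000
  -- the image's data and the parameter block are off run_ctors's footprint (32 bytes of stack, shadow bytes)
  have hdataR : Mem.EqOn 0x100000 0x700000 u.mem s_100000r.mem := by
    refine Mem.EqOn.step_same (Mem.EqOn.writeLE _ _ _ _ _ _ (by decide) (by decide)) w_same ?_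
    intro w hw
    rcases List.mem_cons.mp hw with rfl | hw
    · left
      decide
    · have hshadow := Toy.Spec.Proved.start.st_registerWrites_shadow_w _ hst.descs_ok w hw
      omega
  have hshR : Mem.EqOn 0xC00000 0xE00000 u.mem s_100000.mem := by
    rw [w_mem_100000]
    exact Mem.EqOn.writeLE _ _ _ _ _ _ (by decide) (by decide)
  have p_in : s_100000r.mem.readLE 0x1FF000 8 = 0x200000 := by
    rw [hdataR.readLE _ 8 (by decide) (by decide) (by decide)]
    exact hst.param_in
  have p_len : s_100000r.mem.readLE 0x1FF008 8 = len := by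
    rw [hdataR.readLE _ 8 (by decide) (by decide) (by decide)]
    exact hst.param_len
  have p_out : s_100000r.mem.readLE 0x1FF010 8 = 0x400000 := by
    rw [hdataR.readLE _ 8 (by decide) (by decide) (by decide)]
    exact hst.param_out
  have p_cap : s_100000r.mem.readLE 0x1FF018 8 = 0x300000 := by
    rw [hdataR.readLE _ 8 (by decide) (by decide) (by decide)]
    exact hst.param_cap
  have p_heap : s_100000r.mem.readLE 0x1FF030 8 = 0x800000 := by
    rw [hdataR.readLE _ 8 (by decide) (by decide) (by decide)]
    exact hst.param_heap
  have p_hlen : s_100000r.mem.readLE 0x1FF038 8 = 0x400000 := by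
    rw [hdataR.readLE _ 8 (by decide) (by decide) (by decide)]
    exact hst.param_heap_len
  have hpostR : Mem.EqOn 0xC00000 0xE00000 (registerMem s_100000.mem rt.descs) s_100000r.mem := w_post
  clear w_same w_post
  -- 0x100005 … 0x100035: the six parameter loads, call prog_main
  u_walk hcode [hμ.vendor] span [ProgX.Base.L.textLo, ProgX.Base.L.textHi] side (v_side)
  case call_inv =>
    v_inv
  case pre_100035 =>
    -- the push of the return address went to the stack: off the shadow
    have hsh35 : Mem.EqOn 0xC00000 0xE00000 s_100000r.mem s_100035.mem := by
      rw [w_mem]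
      exact Mem.EqOn.writeLE _ _ _ _ _ _ (by decide) (by decide)
    -- the shadow layer after the registration of the globals, the clean stack ending at 800000H = rsp + 8
    have hinv : ShadowInv (Toy.Globals.objs ++ initialObjs len) [] ((s_100035.reg .rsp).toNat + 8) s_100035.mem := by
      rw [w_rsp]
      exact hst.registered s_100000.mem s_100035.mem hshR (hpostR.trans hsh35)
    have e_rsi : (s_100035.reg .rsi).toNat = len := by
      rw [w_rsi]
      exact Toy.Spec.Proved.start.st_toNat_ofNat_w len hst.len_le
    have hlen := hst.len_le
    refine ⟨⟨hinv, Toy.Spec.Proved.start.st_offText_w len⟩, ?_, ?_, ?_, ?_, ?_⟩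
    · -- len ≤ 1FF000H
      rw [e_rsi]
      exact hlen
    · -- the input: `len` bytes at 200000H, below the stack region
      right
      rw [e_rsi, w_rdi]
      refine ⟨Toy.Spec.Proved.start.st_live_in_w len, ?_⟩
      left
      show 0x200000 + len ≤ 0x700000
      omega
    · -- the output: 8 bytes at 400000H
      rw [w_rdx]
      exact Toy.Spec.Proved.start.st_live_out_w len
    · -- … below the stack region
      rw [w_rdx]
      left
      decide
    · -- `weights` is one of the registered globals
      apply List.mem_append_left
      decide
  -- 0x10003a (ret2): the state prog_main returned; its result is any word
  v_after_call w_rsp_100035 w_mem_100035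
  obtain ⟨z, w_rax⟩ : ∃ z, s_100035r.reg .rax = z := ⟨_, rfl⟩
  clear w_same w_post
  -- 0x10003a … 0x100056: the three unchecked stores of the result, `prog_exit: hlt` not yet executed
  u_walk hcode [hμ.vendor] until [ProgX.Base.L.exit] span [ProgX.Base.L.textLo, ProgX.Base.L.textHi] side (v_side)
  -- 0x100056: EXIT
  refine ReachVia.done ?_
  exact w_rip
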